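-- pv_equiv track=rewrite | github.com/vaynexie/Leetcode-Algorithm | 205. Isomorphic Strings_e.py | check
-- ===== SOURCE A (Python) =====
-- def check(aa):
--     tt='1'
--     num=1
--     seen= {aa[0]: num}
--     for i in range(1,len(aa)):
--         if aa[i] in seen.keys():
--             tt+=str(seen[aa[i]])
--         else:
--             num+=1
--             seen[aa[i]]=str(num)
--             tt+=str(seen[aa[i]])
--     return tt
-- ===== SOURCE B (Python) =====
-- def check(aa):
--     # Two passes: build the char->id table first (seeded from aa[0], so the
--     # empty string still raises IndexError like A), then render the output.
--     mapping = {aa[0]: 1}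
--     for c in aa[1:]:
--         if c not in mapping:
--             mapping[c] = len(mapping) + 1
--     return ''.join(str(mapping[c]) for c in aa)
-- ===== Notes on version B (the rewrite author's own statement) =====
-- stated objective: alternative
-- what changed: A interleaves building the char-id table with appending digits to the result in one indexed loop over a mixed-type dict; B first builds the complete char->id mapping in one pass over the tail, then renders the whole output in a separate join pass over the full string.
import Mathlib
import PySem

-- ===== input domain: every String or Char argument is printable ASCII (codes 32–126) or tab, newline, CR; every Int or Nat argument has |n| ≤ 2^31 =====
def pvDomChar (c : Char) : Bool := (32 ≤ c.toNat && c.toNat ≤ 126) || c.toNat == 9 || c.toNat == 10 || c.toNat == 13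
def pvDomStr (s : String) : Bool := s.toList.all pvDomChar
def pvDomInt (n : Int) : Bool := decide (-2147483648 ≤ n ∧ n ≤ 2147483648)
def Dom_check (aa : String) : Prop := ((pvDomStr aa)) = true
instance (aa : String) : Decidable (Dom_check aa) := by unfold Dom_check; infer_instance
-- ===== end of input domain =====

-- B replaces A's single interleaved build-table-and-append loop by a table-building
-- pass followed by a separate rendering pass (objective: alternative decomposition).

-- ===== PORT A =====
-- One loop step of A: look the char up in `seen`; on a hit append its stored digits,
-- on a miss bump num, store str(num) and append it.  A stores the int 1 for aa[0] and
-- strings for the later keys, but only str(seen[c]) is ever used, so the values are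
-- kept as the char lists str() would produce (exact: str of the stored value).
def aStep (st : List Char × Int × PySem.Dict Char (List Char)) (c : Char) :
    List Char × Int × PySem.Dict Char (List Char) :=
  match st.2.2.get? c with
  | some v => (st.1 ++ v, st.2.1, st.2.2)
  | none =>
      (st.1 ++ PySem.Int.toChars (st.2.1 + 1), st.2.1 + 1,
       st.2.2.insert c (PySem.Int.toChars (st.2.1 + 1)))

def check (aa : String) : String :=
  match aa.toList with
  | [] => ""   -- Python raises IndexError on aa[0] here; excluded by Pre_check
  | c0 :: rest =>
      -- tt='1'; num=1; seen={aa[0]: 1}; for i in range(1,len(aa)): …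
      String.ofList (rest.foldl aStep
        (['1'], 1, (PySem.Dict.empty).insert c0 (PySem.Int.toChars 1))).1

-- ===== PORT B =====
-- One step of B's table-building pass: if c not in mapping, mapping[c] = len(mapping)+1.
def bStep (m : PySem.Dict Char Int) (c : Char) : PySem.Dict Char Int :=
  if m.contains c then m else m.insert c ((m.size : Int) + 1)

def check_alt (aa : String) : String :=
  match aa.toList with
  | [] => ""   -- B's mapping = {aa[0]: 1} raises IndexError here too; excluded by Pre_check
  | c0 :: rest =>
      let m := rest.foldl bStep ((PySem.Dict.empty).insert c0 1)
      -- ''.join(str(mapping[c]) for c in aa); every char of aa is a key of mapping,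
      -- so mapping[c] never raises: getD's default is unreachable.
      String.ofList (PySem.Chars.join []
        ((c0 :: rest).map (fun c => PySem.Int.toChars (m.getD c 0))))

-- ===== PRECONDITION & SPEC =====
-- Pre_ excludes only the empty string, on which both A and B raise IndexError (aa[0]).
def Pre_check (aa : String) : Prop := aa.toList ≠ []
instance (aa : String) : Decidable (Pre_check aa) := by unfold Pre_check; infer_instance
def pvWitness_check : String := "aba"

def Spec_check (aa : String) (out : String) : Prop := out = check_alt aa
instance (aa : String) (out : String) : Decidable (Spec_check aa out) := by unfold Spec_check; infer_instance

-- ===== CLAIM (what is proved, stated in full; the proofs are below) =====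
def Claim_equal_check : Prop := ∀ (aa : String), Dom_check aa → Pre_check aa → Spec_check aa (check aa)

-- ===== LEMMAS AND PROOFS =====

-- ''.join splits off its head item
theorem joinNilCons (x : List Char) (xs : List (List Char)) :
    PySem.Chars.join [] (x :: xs) = x ++ PySem.Chars.join [] xs := by
  cases xs with
  | nil => simp [PySem.Chars.join_singleton, PySem.Chars.join_nil]
  | cons q rest => simp [PySem.Chars.join_cons_cons]

-- B's mapping with its Int values rendered as the char lists A stores
def toS (m : PySem.Dict Char Int) : PySem.Dict Char (List Char) :=
  PySem.Dict.mk (m.items.map (fun p => (p.1, PySem.Int.toChars p.2)))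

theorem get?_toS (m : PySem.Dict Char Int) (c : Char) :
    (toS m).get? c = (m.get? c).map PySem.Int.toChars := by
  obtain ⟨l⟩ := m
  induction l with
  | nil => rfl
  | cons p l ih =>
      simp only [toS] at ih ⊢
      rw [List.map_cons, PySem.Dict.get?_mk_cons, PySem.Dict.get?_mk_cons]
      by_cases h : (p.1 == c) = true
      · rw [if_pos h, if_pos h]; rfl
      · rw [if_neg h, if_neg h]; exact ih

theorem contains_toS (m : PySem.Dict Char Int) (c : Char) :
    (toS m).contains c = m.contains c := by
  rw [PySem.Dict.contains_eq_isSome_get?, PySem.Dict.contains_eq_isSome_get?, get?_toS]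
  cases m.get? c <;> rfl

theorem toS_insert (m : PySem.Dict Char Int) (c : Char) (v : Int)
    (h : m.contains c = false) :
    toS (m.insert c v) = (toS m).insert c (PySem.Int.toChars v) := by
  apply PySem.Dict.ext
  rw [PySem.Dict.items_insert_of_not_contains (toS m) (PySem.Int.toChars v)
        (by rw [contains_toS]; exact h)]
  simp [toS, PySem.Dict.items_insert_of_not_contains m v h]

-- lookups survive B's table-building pass
theorem bBuild_get? (l : List Char) (m : PySem.Dict Char Int) (c : Char) (v : Int)
    (h : m.get? c = some v) : (l.foldl bStep m).get? c = some v := by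
  induction l generalizing m with
  | nil => exact h
  | cons a l ih =>
      simp only [List.foldl_cons]
      apply ih
      unfold bStep
      by_cases ha : m.contains a = true
      · simp [ha, h]
      · have hne : c ≠ a := by
          intro hca; subst hca
          rw [PySem.Dict.contains_eq_isSome_get?, h] at ha; exact ha rfl
        simp [ha, PySem.Dict.get?_insert_of_ne _ _ hne, h]

-- main invariant: A's loop, started from a state mirroring B's mapping m, produces
-- tt followed by B's rendering of the remaining chars through the finished mapping
theorem main_inv (l : List Char) (tt : List Char) (m : PySem.Dict Char Int) :
    (l.foldl aStep (tt, (m.size : Int), toS m)).1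
      = tt ++ PySem.Chars.join []
          (l.map (fun c => PySem.Int.toChars ((l.foldl bStep m).getD c 0))) := by
  induction l generalizing tt m with
  | nil => simp [PySem.Chars.join_nil]
  | cons c l ih =>
      simp only [List.foldl_cons, List.map_cons]
      rw [joinNilCons]
      cases hc : m.get? c with
      | some v =>
          have hb : bStep m c = m := by
            simp [bStep, PySem.Dict.contains_eq_isSome_get?, hc]
          have hstep : aStep (tt, (m.size : Int), toS m) c
              = (tt ++ PySem.Int.toChars v, (m.size : Int), toS m) := by
            simp [aStep, get?_toS, hc]
          have hget : (l.foldl bStep m).getD c 0 = v :=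
            PySem.Dict.getD_of_get?_eq_some _ 0 (bBuild_get? l m c v hc)
          rw [hb, hget, hstep, ih, List.append_assoc]
      | none =>
          have hcont : m.contains c = false := by
            simp [PySem.Dict.contains_eq_isSome_get?, hc]
          have hb : bStep m c = m.insert c ((m.size : Int) + 1) := by
            simp [bStep, hcont]
          have hstep : aStep (tt, (m.size : Int), toS m) c
              = (tt ++ PySem.Int.toChars ((m.size : Int) + 1), (m.size : Int) + 1,
                 (toS m).insert c (PySem.Int.toChars ((m.size : Int) + 1))) := by
            simp [aStep, get?_toS, hc]
          have hsize : (((m.insert c ((m.size : Int) + 1)).size : Nat) : Int)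
              = (m.size : Int) + 1 := by
            rw [PySem.Dict.size_insert]; simp [hcont]
          have hget : (l.foldl bStep (m.insert c ((m.size : Int) + 1))).getD c 0
              = (m.size : Int) + 1 :=
            PySem.Dict.getD_of_get?_eq_some _ 0
              (bBuild_get? l _ c _ (PySem.Dict.get?_insert_self _ _ _))
          have hIH := ih (tt ++ PySem.Int.toChars ((m.size : Int) + 1))
                         (m.insert c ((m.size : Int) + 1))
          rw [hsize, toS_insert m c _ hcont] at hIH
          rw [hb, hget, hstep, hIH, List.append_assoc]

-- ===== VERDICT (by name: the statement is the Claim_ definition above) =====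
theorem check_spec : Claim_equal_check := by
  unfold Claim_equal_check
  intro aa _ hpre
  unfold Spec_check check check_alt
  cases h : aa.toList with
  | nil => exact absurd h hpre
  | cons c0 rest =>
      simp only
      have h0 : ((PySem.Dict.empty : PySem.Dict Char Int).insert c0 1).get? c0 = some 1 :=
        PySem.Dict.get?_insert_self _ _ _
      have hsz : ((((PySem.Dict.empty : PySem.Dict Char Int).insert c0 1).size : Nat) : Int) = 1 := by
        rw [PySem.Dict.size_insert]; simp
      have hts : toS ((PySem.Dict.empty : PySem.Dict Char Int).insert c0 1)
          = (PySem.Dict.empty).insert c0 (PySem.Int.toChars 1) := by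
        rw [toS_insert _ _ _ (by simp)]; rfl
      have hmain := main_inv rest ['1'] ((PySem.Dict.empty : PySem.Dict Char Int).insert c0 1)
      rw [hsz, hts] at hmain
      rw [hmain, List.map_cons, joinNilCons,
        PySem.Dict.getD_of_get?_eq_some _ 0 (bBuild_get? rest _ c0 1 h0)]
      rfl
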